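-- pv_equiv track=rewrite | github.com/hparra/alcp | src/arrays.py | groups_weighted
-- ===== SOURCE A (Python) =====
-- def map(fn, array):
--   newarray = [] # len(array)
--   i = 0
--   while i < len(array):
--     newarray.append(fn(array[i]))
--     i += 1
--   return newarray
--
-- def groups_weighted(array, count):
--   if len(array) < 1:
--     return []
--   elif count < 1:
--     return []
--   elif count > len(array):
--     return map(lambda x: [x], array) + [[]] * (count - len(array))
--   elif count == 1:
--     return [array]
--   else:
--     group = [] # group with lowest max weight
--     group_diff = None # NOTE: lowest diff between max weight and min weight
--     i = 1
--     while i <= len(array) - count + 1: # TODO: WHY +1?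
--       potential_group = [array[0:i]] + groups_weighted(array[i:], count-1)
--       potential_group_values = map(lambda a: sum(a), potential_group)
--       potential_group_diff = max(potential_group_values) - min(potential_group_values)
--       if group_diff is None or potential_group_diff < group_diff:
--         group = potential_group
--         group_diff = potential_group_diff
--       i += 1
--     return group
-- ===== SOURCE B (Python) =====
-- def groups_weighted(array, count):
--   # Bottom-up DP over (suffix start, group count) instead of A's exponential recursion.
--   n = len(array)
--   if n < 1 or count < 1:
--     return []
--   if count > n:
--     return [[x] for x in array] + [[]] * (count - n)
--   if count == 1:
--     return [array]
--   # prev[s] = best partition of array[s:] into c groups (c starts at 1)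
--   prev = [[array[s:]] for s in range(n + 1)]
--   c = 2
--   while c <= count:
--     cur = []
--     for s in range(n + 1):
--       best = None
--       best_diff = None
--       for i in range(1, (n - s) - c + 2):
--         cand = [array[s:s + i]] + prev[s + i]
--         vals = [sum(g) for g in cand]
--         d = max(vals) - min(vals)
--         if best_diff is None or d < best_diff:
--           best = cand
--           best_diff = d
--       cur.append(best if best is not None else [])
--     prev = cur
--     c += 1
--   return prev[0]
-- ===== Notes on version B (the rewrite author's own statement) =====
-- stated objective: faster
-- what changed: Replaced A's exponential recursion over suffixes with a bottom-up dynamic-programming table indexed by (suffix start, number of groups), computing each subproblem once.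
import Mathlib
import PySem

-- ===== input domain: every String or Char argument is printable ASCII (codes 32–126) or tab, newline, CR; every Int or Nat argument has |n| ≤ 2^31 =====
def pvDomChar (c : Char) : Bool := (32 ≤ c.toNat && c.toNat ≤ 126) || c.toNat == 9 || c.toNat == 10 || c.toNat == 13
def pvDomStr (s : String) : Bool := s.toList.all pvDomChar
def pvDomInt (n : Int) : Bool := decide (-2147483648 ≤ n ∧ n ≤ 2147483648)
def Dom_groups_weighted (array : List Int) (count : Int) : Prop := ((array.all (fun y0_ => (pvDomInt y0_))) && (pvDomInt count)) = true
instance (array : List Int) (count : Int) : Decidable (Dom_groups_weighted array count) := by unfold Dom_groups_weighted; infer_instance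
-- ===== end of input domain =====

-- B replaces A's exponential recursion over suffixes by a bottom-up DP table over
-- (suffix start, number of groups); same return value, asymptotically faster.

-- ===== PORT A =====
-- A's same-module `map` helper: appends fn(array[i]) for i = 0..len-1, which is exactly List.map.
def pyMap {α β : Type} (fn : α → β) (arr : List α) : List β := arr.map fn

-- `max(vals)`/`min(vals)` are ported as max?/min? with .getD 0; exact since `potential_group`
-- (hence `vals`) is always nonempty, so max?/min? never return none.
def groups_weighted (array : List Int) (count : Int) : List (List Int) :=
  if array.length < 1 then []
  else if count < 1 then []
  else if (array.length : Int) < count then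
    pyMap (fun x => [x]) array ++ List.replicate (count - array.length).toNat ([] : List Int)
  else if count = 1 then [array]
  else
    ((PySem.List.pyRange 1 ((array.length : Int) - count + 1 + 1) 1).foldl
      (fun (st : List (List Int) × Option Int) i =>
        let pg := PySem.List.slice array (some 0) (some i) ::
          groups_weighted (PySem.List.slice array (some i) none) (count - 1)
        let vals := pyMap (fun a => a.sum) pg
        let d := (PySem.List.max? vals (fun x => x)).getD 0 -
                 (PySem.List.min? vals (fun x => x)).getD 0
        match st.2 with
        | none => (pg, some d)
        | some g => if d < g then (pg, some d) else st)
      ([], none)).1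
termination_by count.toNat
decreasing_by omega

-- ===== PORT B =====
-- `prev[s + i]` and `prev[0]` are ported as pyGet? … |>.getD []; exact since the
-- index is always in range (the table has length n+1 and 0 ≤ s+i ≤ n).
def groups_weighted_alt (array : List Int) (count : Int) : List (List Int) :=
  let n := array.length
  if n < 1 then []
  else if count < 1 then []
  else if (n : Int) < count then
    array.map (fun x => [x]) ++ List.replicate (count - n).toNat ([] : List Int)
  else if count = 1 then [array]
  else
    let prev0 := (List.range (n + 1)).map
      (fun (s : Nat) => [PySem.List.slice array (some (s : Int)) none])
    let final := (PySem.List.pyRange 2 (count + 1) 1).foldl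
      (fun prev c =>
        (List.range (n + 1)).map (fun (s : Nat) =>
          ((PySem.List.pyRange 1 ((n : Int) - s - c + 2) 1).foldl
            (fun (st : Option (List (List Int)) × Option Int) i =>
              let cand := PySem.List.slice array (some (s : Int)) (some ((s : Int) + i)) ::
                (PySem.List.pyGet? prev ((s : Int) + i)).getD []
              let vals := cand.map (fun g => g.sum)
              let d := (PySem.List.max? vals (fun x => x)).getD 0 -
                       (PySem.List.min? vals (fun x => x)).getD 0
              match st.2 with
              | none => (some cand, some d)
              | some g => if d < g then (some cand, some d) else st)
            (none, none)).1.getD []))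
      prev0
    (PySem.List.pyGet? final 0).getD []

-- ===== PRECONDITION & SPEC =====
def Spec_groups_weighted (array : List Int) (count : Int) (out : List (List Int)) : Prop := out = groups_weighted_alt array count
instance (array : List Int) (count : Int) (out : List (List Int)) : Decidable (Spec_groups_weighted array count out) := by unfold Spec_groups_weighted; infer_instance

-- ===== CLAIM (what is proved, stated in full; the proofs are below) =====
def Claim_equal_groups_weighted : Prop := ∀ (array : List Int) (count : Int), Dom_groups_weighted array count → Spec_groups_weighted array count (groups_weighted array count)

-- ===== LEMMAS AND PROOFS =====

-- the shared shape of both inner loops: keep the first candidate of strictly smallest spread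
def selStep (cand : Int → List (List Int)) (st : List (List Int) × Option Int) (i : Int) :
    List (List Int) × Option Int :=
  let pg := cand i
  let vals := pg.map (fun a => a.sum)
  let d := (PySem.List.max? vals (fun x => x)).getD 0 -
           (PySem.List.min? vals (fun x => x)).getD 0
  match st.2 with
  | none => (pg, some d)
  | some g => if d < g then (pg, some d) else st

def selStepO (cand : Int → List (List Int)) (st : Option (List (List Int)) × Option Int) (i : Int) :
    Option (List (List Int)) × Option Int :=
  let pg := cand i
  let vals := pg.map (fun a => a.sum)
  let d := (PySem.List.max? vals (fun x => x)).getD 0 -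
           (PySem.List.min? vals (fun x => x)).getD 0
  match st.2 with
  | none => (some pg, some d)
  | some g => if d < g then (some pg, some d) else st

-- A's candidate at suffix `arr`: prefix of length i plus A's recursive split of the rest
def candA (arr : List Int) (count : Int) (i : Int) : List (List Int) :=
  PySem.List.slice arr (some 0) (some i) ::
    groups_weighted (PySem.List.slice arr (some i) none) (count - 1)

-- B's candidate at start s, read from the previous DP level
def candB (array : List Int) (prev : List (List (List Int))) (s : Nat) (i : Int) : List (List Int) :=
  PySem.List.slice array (some (s : Int)) (some ((s : Int) + i)) ::
    (PySem.List.pyGet? prev ((s : Int) + i)).getD []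

-- one DP level of B
def blevel (array : List Int) (n : Nat) (prev : List (List (List Int))) (c : Int) :
    List (List (List Int)) :=
  (List.range (n + 1)).map (fun (s : Nat) =>
    ((PySem.List.pyRange 1 ((n : Int) - (s : Int) - c + 2) 1).foldl
      (selStepO (candB array prev s)) (none, none)).1.getD [])

lemma gw_else (array : List Int) (count : Int) (h1 : ¬ array.length < 1) (h2 : ¬ count < 1)
    (h3 : ¬ (array.length : Int) < count) (h4 : ¬ count = 1) :
    groups_weighted array count =
      ((PySem.List.pyRange 1 ((array.length : Int) - count + 1 + 1) 1).foldl
        (selStep (candA array count)) ([], none)).1 := by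
  rw [groups_weighted]
  simp only [if_neg h1, if_neg h2, if_neg h3, if_neg h4]
  rfl

lemma alt_else (array : List Int) (count : Int) (h1 : ¬ array.length < 1) (h2 : ¬ count < 1)
    (h3 : ¬ (array.length : Int) < count) (h4 : ¬ count = 1) :
    groups_weighted_alt array count =
      (PySem.List.pyGet?
        ((PySem.List.pyRange 2 (count + 1) 1).foldl (blevel array array.length)
          ((List.range (array.length + 1)).map
            (fun (s : Nat) => [PySem.List.slice array (some (s : Int)) none]))) 0).getD [] := by
  rw [groups_weighted_alt]
  simp only [if_neg h1, if_neg h2, if_neg h3, if_neg h4]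
  rfl

lemma selO_rel (cand : Int → List (List Int)) (idxs : List Int) (g : List (List Int)) (gd : Int) :
    List.foldl (selStepO cand) (some g, some gd) idxs =
      (some (List.foldl (selStep cand) (g, some gd) idxs).1,
        (List.foldl (selStep cand) (g, some gd) idxs).2) := by
  induction idxs generalizing g gd with
  | nil => rfl
  | cons j rest ih =>
    simp only [List.foldl_cons, selStep, selStepO]
    split_ifs <;> exact ih _ _

lemma sel_init (cand : Int → List (List Int)) (idxs : List Int) :
    (List.foldl (selStepO cand) (none, none) idxs).1.getD [] =
      (List.foldl (selStep cand) ([], none) idxs).1 := by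
  cases idxs with
  | nil => rfl
  | cons j rest =>
    simp only [List.foldl_cons, selStep, selStepO]
    rw [selO_rel]
    rfl

-- the DP invariant: every valid table entry is A's answer for the corresponding suffix
def GWInv (array : List Int) (tbl : List (List (List Int))) (c : Int) : Prop :=
  tbl.length = array.length + 1 ∧
    ∀ s : Nat, s ≤ array.length → c ≤ (array.length : Int) - s →
      PySem.List.pyGet? tbl (s : Int) = some (groups_weighted (array.drop s) c)

lemma inv_base (array : List Int) :
    GWInv array ((List.range (array.length + 1)).map
      (fun (s : Nat) => [PySem.List.slice array (some (s : Int)) none])) 1 := by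
  constructor
  · simp
  · intro s hs hc
    have hlen : 1 ≤ (array.drop s).length := by
      rw [List.length_drop]; omega
    rw [PySem.List.pyGet?_natCast, List.getElem?_map,
      List.getElem?_range (by omega : s < array.length + 1)]
    rw [groups_weighted]
    rw [if_neg (by omega : ¬ (array.drop s).length < 1),
      if_neg (by omega : ¬ (1:Int) < 1),
      if_neg (by omega : ¬ ((array.drop s).length : Int) < 1),
      if_pos rfl]
    simp [PySem.List.slice_from_natCast]

lemma inv_step (array : List Int) (tbl : List (List (List Int))) (c : Int) (hc : 1 ≤ c)
    (h : GWInv array tbl c) : GWInv array (blevel array array.length tbl (c + 1)) (c + 1) := by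
  obtain ⟨hlen, hent⟩ := h
  constructor
  · simp [blevel]
  · intro s hs hcs
    have hdl : (array.drop s).length = array.length - s := List.length_drop
    rw [blevel, PySem.List.pyGet?_natCast, List.getElem?_map,
      List.getElem?_range (by omega : s < array.length + 1), Option.map_some]
    congr 1
    rw [gw_else (array.drop s) (c + 1)
      (by omega) (by omega)
      (by rw [hdl]; omega) (by omega)]
    have hrange : ((array.drop s).length : Int) - (c + 1) + 1 + 1 =
        (array.length : Int) - (s : Int) - (c + 1) + 2 := by
      rw [hdl]; omega
    rw [hrange]
    have hcand : ∀ i ∈ PySem.List.pyRange 1 ((array.length : Int) - (s : Int) - (c + 1) + 2) 1,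
        candB array tbl s i = candA (array.drop s) (c + 1) i := by
      intro i hi
      rw [PySem.List.mem_pyRange_one] at hi
      obtain ⟨j, rfl⟩ : ∃ j : Nat, i = (j : Int) :=
        ⟨i.toNat, (Int.toNat_of_nonneg (by omega)).symm⟩
      have hj : s + j ≤ array.length ∧ c ≤ (array.length : Int) - ((s + j : Nat) : Int) := by
        constructor <;> [omega; (push_cast; omega)]
      have htl := hent (s + j) hj.1 hj.2
      unfold candA candB
      congr 1
      · rw [PySem.List.slice_natCast_add]
        simp [PySem.List.slice_to_natCast]
      · have hsj : (s : Int) + (j : Int) = ((s + j : Nat) : Int) := by push_cast; ring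
        rw [hsj, htl, Option.getD_some]
        rw [PySem.List.slice_from_natCast]
        have : (array.drop s).drop j = array.drop (s + j) := by
          rw [List.drop_drop]
        rw [this]
        congr 1
        omega
    rw [PySem.List.foldl_congr_mem _ (selStepO (candB array tbl s))
      (selStepO (candA (array.drop s) (c + 1))) _
      (fun acc i hi => by simp only [selStepO, hcand i hi])]
    exact sel_init _ _

lemma inv_levels (array : List Int) (count : Int) (k : Nat) :
    ∀ (c : Int) (tbl : List (List (List Int))), 1 ≤ c → c + k = count → GWInv array tbl c →
      GWInv array ((PySem.List.pyRange (c + 1) (count + 1) 1).foldl (blevel array array.length) tbl)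
        count := by
  induction k with
  | zero =>
    intro c tbl hc hck hinv
    have hceq : c = count := by omega
    subst hceq
    rw [PySem.List.pyRange_one_eq_nil (by omega)]
    exact hinv
  | succ k ih =>
    intro c tbl hc hck hinv
    rw [PySem.List.pyRange_one_cons (by omega : c + 1 < count + 1), List.foldl_cons]
    exact ih (c + 1) (blevel array array.length tbl (c + 1)) (by omega) (by push_cast at hck ⊢; omega)
      (inv_step array tbl c hc hinv)

-- ===== VERDICT (by name: the statement is the Claim_ definition above) =====
theorem groups_weighted_spec : Claim_equal_groups_weighted := by
  intro array count _
  unfold Spec_groups_weighted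
  by_cases h1 : array.length < 1
  · rw [groups_weighted, groups_weighted_alt]; simp [h1]
  by_cases h2 : count < 1
  · rw [groups_weighted, groups_weighted_alt]; simp [h1, h2]
  by_cases h3 : (array.length : Int) < count
  · rw [groups_weighted, groups_weighted_alt]; simp [h1, h2, h3, pyMap]
  by_cases h4 : count = 1
  · rw [groups_weighted, groups_weighted_alt]; simp [h1, h4, pyMap]
  rw [alt_else array count h1 h2 h3 h4]
  have hk : (1 : Int) + ((count - 1).toNat : Nat) = count := by omega
  have hinv := inv_levels array count (count - 1).toNat 1
    ((List.range (array.length + 1)).map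
      (fun (s : Nat) => [PySem.List.slice array (some (s : Int)) none]))
    (by omega) hk (inv_base array)
  have e2 : (1 : Int) + 1 = 2 := by norm_num
  rw [e2] at hinv
  obtain ⟨hl, he⟩ := hinv
  have h0 := he 0 (by omega) (by push_cast; omega)
  simp only [Nat.cast_zero, List.drop_zero] at h0
  rw [h0, Option.getD_some]
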